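-- pv_equiv track=rewrite | github.com/SzymonIwaniuk/wdi-2024-2025 | Zestaw2/ZadB12021.py | identyczne
-- ===== SOURCE A (Python) =====
-- def identyczne(a, b):
--
--     T = [0 for _ in range(10)]
--
--     while a > 0:
--         if T[a % 10] < 1:
--             T[a % 10] += 1
--
--         a //= 10
--
--     while b > 0:
--         if T[b % 10] > 0:
--             b //= 10
--
--         else: return False
--
--
--     return True
-- ===== SOURCE B (Python) =====
-- def identyczne(a, b):
--     # For each digit of b, scan a's digits directly (no table/set is built).
--     def has_digit(n, d):
--         while n > 0:
--             if n % 10 == d: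
--                 return True
--             n //= 10
--         return False
--     while b > 0:
--         if not has_digit(a, b % 10):
--             return False
--         b //= 10
--     return True
-- ===== Notes on version B (the rewrite author's own statement) =====
-- stated objective: alternative
-- what changed: Drops A's 10-slot mark table entirely: B checks each digit of b by directly rescanning a's digits (nested arithmetic scans), trading the precomputed membership structure for brute-force search.
import Mathlib
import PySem

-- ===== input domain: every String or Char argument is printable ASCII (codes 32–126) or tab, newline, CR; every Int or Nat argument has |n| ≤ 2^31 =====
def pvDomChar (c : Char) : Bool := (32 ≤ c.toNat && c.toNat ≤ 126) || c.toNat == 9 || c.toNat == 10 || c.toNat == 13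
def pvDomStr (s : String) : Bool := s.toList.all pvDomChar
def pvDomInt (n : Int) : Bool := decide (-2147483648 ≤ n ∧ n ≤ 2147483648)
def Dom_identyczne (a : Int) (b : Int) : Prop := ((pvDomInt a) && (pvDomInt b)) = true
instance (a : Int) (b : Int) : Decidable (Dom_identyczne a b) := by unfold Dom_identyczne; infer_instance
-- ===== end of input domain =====

-- B drops A's mark table: it rescans a's digits for every digit of b (brute-force nested scans, alternative decomposition).


-- termination helper for the while-loops (n //= 10 strictly shrinks a positive n)
theorem pvFd10_toNat_lt (n : Int) (h : 0 < n) : (PySem.Int.floordiv n 10).toNat < n.toNat := by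
  rw [PySem.Int.floordiv_eq_ediv_of_pos (by norm_num)]
  omega

-- ===== PORT A =====
-- first while-loop: mark digits of a in table T (indices a%10 are always 0..9, so pyGetD/pySetD are exact here)
def aLoop1 (T : List Int) (a : Int) : List Int :=
  if h : a > 0 then
    let T' := if PySem.List.pyGetD T (PySem.Int.mod a 10) 0 < 1
              then PySem.List.pySetD T (PySem.Int.mod a 10) (PySem.List.pyGetD T (PySem.Int.mod a 10) 0 + 1)
              else T
    aLoop1 T' (PySem.Int.floordiv a 10)
  else T
termination_by a.toNat
decreasing_by exact pvFd10_toNat_lt a h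

-- second while-loop: check each digit of b against T, early return False
def aLoop2 (T : List Int) (b : Int) : Bool :=
  if h : b > 0 then
    if PySem.List.pyGetD T (PySem.Int.mod b 10) 0 > 0 then aLoop2 T (PySem.Int.floordiv b 10)
    else false
  else true
termination_by b.toNat
decreasing_by exact pvFd10_toNat_lt b h

def identyczne (a : Int) (b : Int) : Bool :=
  aLoop2 (aLoop1 ((PySem.List.pyRange 0 10 1).map (fun _ => (0 : Int))) a) b

-- ===== PORT B =====
-- has_digit(n, d): while n > 0: if n % 10 == d: return True; n //= 10; return False
def hasDigit (n : Int) (d : Int) : Bool :=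
  if h : n > 0 then
    if PySem.Int.mod n 10 = d then true else hasDigit (PySem.Int.floordiv n 10) d
  else false
termination_by n.toNat
decreasing_by exact pvFd10_toNat_lt n h

-- outer while-loop over b's digits, early return False
def bLoop (a : Int) (b : Int) : Bool :=
  if h : b > 0 then
    if hasDigit a (PySem.Int.mod b 10) then bLoop a (PySem.Int.floordiv b 10) else false
  else true
termination_by b.toNat
decreasing_by exact pvFd10_toNat_lt b h

def identyczne_alt (a : Int) (b : Int) : Bool := bLoop a b

-- ===== PRECONDITION & SPEC =====
def Spec_identyczne (a : Int) (b : Int) (out : Bool) : Prop := out = identyczne_alt a b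
instance (a : Int) (b : Int) (out : Bool) : Decidable (Spec_identyczne a b out) := by unfold Spec_identyczne; infer_instance

-- ===== CLAIM (what is proved, stated in full; the proofs are below) =====
def Claim_equal_identyczne : Prop := ∀ (a : Int) (b : Int), Dom_identyczne a b → Spec_identyczne a b (identyczne a b)

-- ===== LEMMAS AND PROOFS =====

-- proof-only helper: the set of digits of n (used to characterise both ports)
def digitsOf (s : PySem.Set Int) (n : Int) : PySem.Set Int :=
  if h : n > 0 then digitsOf (PySem.Set.add s (PySem.Int.mod n 10)) (PySem.Int.floordiv n 10) else s
termination_by n.toNat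
decreasing_by exact pvFd10_toNat_lt n h

-- membership in digitsOf splits into the accumulator and the digits proper
theorem mem_digitsOf (n : Int) (s : PySem.Set Int) (d : Int) :
    d ∈ digitsOf s n ↔ d ∈ s ∨ d ∈ digitsOf PySem.Set.empty n := by
  by_cases h : n > 0
  · rw [digitsOf, dif_pos h]
    conv_rhs => rw [digitsOf, dif_pos h]
    rw [mem_digitsOf (PySem.Int.floordiv n 10) (PySem.Set.add s (PySem.Int.mod n 10)) d,
        mem_digitsOf (PySem.Int.floordiv n 10) (PySem.Set.add PySem.Set.empty (PySem.Int.mod n 10)) d,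
        PySem.Set.mem_add, PySem.Set.mem_add]
    simp only [PySem.Set.empty, List.not_mem_nil, false_or]
    tauto
  · rw [digitsOf, dif_neg h]
    conv_rhs => rw [digitsOf, dif_neg h]
    simp [PySem.Set.empty]
termination_by n.toNat
decreasing_by all_goals exact pvFd10_toNat_lt n h

-- digits are in [0, 10)
theorem digitsOf_bounds_aux (n : Int) (s : PySem.Set Int) (hs : ∀ d ∈ s, 0 ≤ d ∧ d < 10) :
    ∀ d ∈ digitsOf s n, 0 ≤ d ∧ d < 10 := by
  by_cases h : n > 0
  · rw [digitsOf, dif_pos h]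
    refine digitsOf_bounds_aux _ _ ?_
    intro d hd
    rcases (PySem.Set.mem_add s (PySem.Int.mod n 10) d).mp hd with h1 | h1
    · exact hs d h1
    · subst h1
      exact ⟨PySem.Int.mod_nonneg n (by norm_num), PySem.Int.mod_lt n (by norm_num)⟩
  · rw [digitsOf, dif_neg h]; exact hs
termination_by n.toNat
decreasing_by exact pvFd10_toNat_lt n h

theorem digitsOf_bounds (n : Int) : ∀ d ∈ digitsOf PySem.Set.empty n, 0 ≤ d ∧ d < 10 := by
  exact digitsOf_bounds_aux n PySem.Set.empty (by simp [PySem.Set.empty])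

-- one step of the table update
theorem pvStep_getD (T : List Int) (m d : Int) (hT : T.length = 10)
    (hm0 : 0 ≤ m) (hm1 : m < 10) (hd0 : 0 ≤ d) (hd1 : d < 10) (v : Int) :
    PySem.List.pyGetD (PySem.List.pySetD T m v) d 0 = if d = m then v else PySem.List.pyGetD T d 0 := by
  rw [PySem.List.pySetD_of_nonneg T v hm0,
      PySem.List.pyGetD_eq_getElem _ 0 hd0 (by simp [hT]; omega),
      List.getElem_set]
  rw [PySem.List.pyGetD_eq_getElem T 0 hd0 (by omega)]
  by_cases he : d = m
  · subst he; simp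
  · rw [if_neg (by omega), if_neg he]

-- loop-1 invariant: a slot is positive after the loop iff it was positive before or its index is a digit of a
theorem aLoop1_mark (a : Int) (T : List Int) (hT : T.length = 10)
    (hnn : ∀ e : Int, 0 ≤ e → e < 10 → 0 ≤ PySem.List.pyGetD T e 0) (d : Int) (hd0 : 0 ≤ d) (hd1 : d < 10) :
    (0 < PySem.List.pyGetD (aLoop1 T a) d 0 ↔ 0 < PySem.List.pyGetD T d 0 ∨ d ∈ digitsOf PySem.Set.empty a) := by
  by_cases h : a > 0
  · have hm0 : 0 ≤ PySem.Int.mod a 10 := PySem.Int.mod_nonneg a (by norm_num)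
    have hm1 : PySem.Int.mod a 10 < 10 := PySem.Int.mod_lt a (by norm_num)
    have hdig : ∀ e : Int, e ∈ digitsOf PySem.Set.empty a ↔ e = PySem.Int.mod a 10 ∨ e ∈ digitsOf PySem.Set.empty (PySem.Int.floordiv a 10) := by
      intro e
      conv_lhs => rw [digitsOf, dif_pos h]
      rw [mem_digitsOf, PySem.Set.mem_add]
      simp only [PySem.Set.empty, List.not_mem_nil, false_or]
    rw [aLoop1, dif_pos h]
    set m := PySem.Int.mod a 10 with hmdef
    by_cases hc : PySem.List.pyGetD T m 0 < 1
    · rw [if_pos hc]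
      have hz : PySem.List.pyGetD T m 0 = 0 := le_antisymm (by omega) (hnn m hm0 hm1)
      rw [aLoop1_mark (PySem.Int.floordiv a 10) _ (by rw [PySem.List.length_pySetD]; exact hT)
            (by
              intro e he0 he1
              rw [pvStep_getD T m e hT hm0 hm1 he0 he1]
              split
              · omega
              · exact hnn e he0 he1) d hd0 hd1,
          pvStep_getD T m d hT hm0 hm1 hd0 hd1, hdig d]
      by_cases he : d = m
      · subst he; simp [hz]
      · rw [if_neg he]; tauto
    · rw [if_neg hc]
      rw [aLoop1_mark (PySem.Int.floordiv a 10) T hT hnn d hd0 hd1, hdig d]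
      constructor
      · tauto
      · rintro (h1 | h1 | h1)
        · tauto
        · subst h1; left; omega
        · tauto
  · rw [aLoop1, dif_neg h]
    conv_rhs => rw [digitsOf, dif_neg h]
    simp [PySem.Set.empty]
termination_by a.toNat
decreasing_by all_goals exact pvFd10_toNat_lt a h

-- loop-2 characterisation: True iff every digit of b has a positive mark
theorem aLoop2_iff (b : Int) (T : List Int) :
    (aLoop2 T b = true ↔ ∀ d ∈ digitsOf PySem.Set.empty b, 0 < PySem.List.pyGetD T d 0) := by
  by_cases h : b > 0
  · have hdig : ∀ e : Int, e ∈ digitsOf PySem.Set.empty b ↔ e = PySem.Int.mod b 10 ∨ e ∈ digitsOf PySem.Set.empty (PySem.Int.floordiv b 10) := by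
      intro e
      conv_lhs => rw [digitsOf, dif_pos h]
      rw [mem_digitsOf, PySem.Set.mem_add]
      simp only [PySem.Set.empty, List.not_mem_nil, false_or]
    rw [aLoop2, dif_pos h]
    by_cases hc : PySem.List.pyGetD T (PySem.Int.mod b 10) 0 > 0
    · rw [if_pos hc, aLoop2_iff (PySem.Int.floordiv b 10) T]
      constructor
      · intro hall d hdm
        rcases (hdig d).mp hdm with h1 | h1
        · subst h1; exact hc
        · exact hall d h1
      · intro hall d hdm
        exact hall d ((hdig d).mpr (Or.inr hdm))
    · rw [if_neg hc]
      simp only [Bool.false_eq_true, false_iff]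
      intro hall
      exact hc (hall _ ((hdig _).mpr (Or.inl rfl)))
  · rw [aLoop2, dif_neg h]
    conv_rhs => rw [digitsOf, dif_neg h]
    simp [PySem.Set.empty]
termination_by b.toNat
decreasing_by all_goals exact pvFd10_toNat_lt b h

-- hasDigit scans exactly the digits of n
theorem hasDigit_iff (n : Int) (d : Int) :
    (hasDigit n d = true ↔ d ∈ digitsOf PySem.Set.empty n) := by
  by_cases h : n > 0
  · rw [hasDigit, dif_pos h]
    conv_rhs => rw [digitsOf, dif_pos h]
    rw [mem_digitsOf, PySem.Set.mem_add]
    simp only [PySem.Set.empty, List.not_mem_nil, false_or]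
    by_cases he : PySem.Int.mod n 10 = d
    · rw [if_pos he]
      exact ⟨fun _ => Or.inl he.symm, fun _ => rfl⟩
    · rw [if_neg he, hasDigit_iff (PySem.Int.floordiv n 10) d]
      constructor
      · tauto
      · rintro (h1 | h1)
        · exact absurd h1.symm he
        · exact h1
  · rw [hasDigit, dif_neg h]
    conv_rhs => rw [digitsOf, dif_neg h]
    simp [PySem.Set.empty]
termination_by n.toNat
decreasing_by all_goals exact pvFd10_toNat_lt n h

-- outer loop of B: True iff every digit of b occurs among a's digits
theorem bLoop_iff (b : Int) (a : Int) :
    (bLoop a b = true ↔ ∀ d ∈ digitsOf PySem.Set.empty b, d ∈ digitsOf PySem.Set.empty a) := by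
  by_cases h : b > 0
  · have hdig : ∀ e : Int, e ∈ digitsOf PySem.Set.empty b ↔ e = PySem.Int.mod b 10 ∨ e ∈ digitsOf PySem.Set.empty (PySem.Int.floordiv b 10) := by
      intro e
      conv_lhs => rw [digitsOf, dif_pos h]
      rw [mem_digitsOf, PySem.Set.mem_add]
      simp only [PySem.Set.empty, List.not_mem_nil, false_or]
    rw [bLoop, dif_pos h]
    by_cases hc : hasDigit a (PySem.Int.mod b 10) = true
    · rw [if_pos hc, bLoop_iff (PySem.Int.floordiv b 10) a]
      constructor
      · intro hall d hdm
        rcases (hdig d).mp hdm with h1 | h1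
        · subst h1; exact (hasDigit_iff a _).mp hc
        · exact hall d h1
      · intro hall d hdm
        exact hall d ((hdig d).mpr (Or.inr hdm))
    · rw [if_neg hc]
      simp only [Bool.false_eq_true, false_iff]
      intro hall
      exact hc ((hasDigit_iff a _).mpr (hall _ ((hdig _).mpr (Or.inl rfl))))
  · rw [bLoop, dif_neg h]
    conv_rhs => rw [digitsOf, dif_neg h]
    simp [PySem.Set.empty]
termination_by b.toNat
decreasing_by all_goals exact pvFd10_toNat_lt b h

theorem pvInitTable : (PySem.List.pyRange 0 10 1).map (fun _ => (0 : Int)) = List.replicate 10 0 := by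
  decide

-- ===== VERDICT (by name: the statement is the Claim_ definition above) =====
theorem identyczne_spec : Claim_equal_identyczne := by
  intro a b _
  unfold Spec_identyczne identyczne identyczne_alt
  rw [Bool.eq_iff_iff, aLoop2_iff, bLoop_iff]
  have hz : ∀ e : Int, 0 ≤ e → e < 10 →
      PySem.List.pyGetD ((PySem.List.pyRange 0 10 1).map (fun _ => (0 : Int))) e 0 = 0 := by
    intro e he0 he1
    rw [pvInitTable, PySem.List.pyGetD_eq_getElem _ 0 he0 (by simp; omega), List.getElem_replicate]
  constructor
  · intro hall d hd
    obtain ⟨hd0, hd1⟩ := digitsOf_bounds b d hd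
    have := hall d hd
    rw [aLoop1_mark a _ (by rw [pvInitTable]; rfl) (fun e he0 he1 => le_of_eq (hz e he0 he1).symm) d hd0 hd1] at this
    rcases this with h1 | h1
    · rw [hz d hd0 hd1] at h1; omega
    · exact h1
  · intro hall d hd
    obtain ⟨hd0, hd1⟩ := digitsOf_bounds b d hd
    rw [aLoop1_mark a _ (by rw [pvInitTable]; rfl) (fun e he0 he1 => le_of_eq (hz e he0 he1).symm) d hd0 hd1]
    exact Or.inr (hall d hd)
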